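-- pv_equiv track=rewrite | github.com/elvispy/PESolutions | Problems201-300/PE205.py | probs
-- ===== SOURCE A (Python) =====
-- def probs(nb, si):
--     if nb == 1:
--         return [0] + [1] * si
--     res = [0] * (nb*si + 1)
--     ant = probs(nb-1, si)
--     for j in range(len(ant)):
--         for k in range(1, si+1):
--             res[j + k] += ant[j]
--     return res
-- ===== SOURCE B (Python) =====
-- def probs(nb, si):
--     # prefix-sum / sliding-window convolution: each extra die is added in
--     # O(nb*si) via prefix sums instead of the O(nb*si*si) scatter loop.
--     dist = [0] + [1] * si
--     for m in range(2, nb + 1):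
--         pref = [0]
--         s = 0
--         for x in dist:
--             s += x
--             pref.append(s)
--         L = len(dist)
--         dist = [pref[min(t, L)] - pref[max(t - si, 0)] for t in range(m * si + 1)]
--     return dist
-- ===== Notes on version B (the rewrite author's own statement) =====
-- stated objective: faster
-- what changed: Replaces the recursive scatter-add double loop (for each previous outcome, add it to si cells) by an iterative convolution with the uniform kernel done as a prefix-sum sliding window, so the inner loop over the si faces disappears.
import Mathlib
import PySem

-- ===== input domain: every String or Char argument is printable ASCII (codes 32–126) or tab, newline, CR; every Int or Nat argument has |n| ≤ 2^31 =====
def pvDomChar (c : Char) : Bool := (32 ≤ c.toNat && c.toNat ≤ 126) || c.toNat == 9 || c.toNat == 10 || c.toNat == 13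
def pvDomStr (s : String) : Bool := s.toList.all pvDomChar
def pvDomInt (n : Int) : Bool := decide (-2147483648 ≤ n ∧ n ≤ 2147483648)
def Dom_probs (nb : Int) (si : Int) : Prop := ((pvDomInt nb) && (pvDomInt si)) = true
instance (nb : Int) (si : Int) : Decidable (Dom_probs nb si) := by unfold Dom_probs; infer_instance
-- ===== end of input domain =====

-- B replaces A's recursive scatter-add double loop by an iterative prefix-sum
-- sliding-window convolution, removing the inner loop over the si faces (objective: faster).

-- ===== PORT A =====
-- res[i] += v  (List.set is a no-op out of range; every executed write is in range)
def pvAddAt (l : List Int) (i : Nat) (v : Int) : List Int :=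
  l.set i (l.getD i 0 + v)

-- recursion on nb; the fuel-0 branch is unreachable: Python recurses forever for nb ≤ 0,
-- which Pre_probs excludes.
def probsA : Nat → Int → List Int
  | 0, _ => []
  | 1, si => 0 :: List.replicate si.toNat 1
  | n + 2, si =>
    let ant := probsA (n + 1) si
    (List.range ant.length).foldl
      (fun r (j : Nat) =>
        (PySem.List.pyRange 1 (si + 1) 1).foldl
          (fun r k => pvAddAt r ((j : Int) + k).toNat (ant.getD j 0)) r)
      (List.replicate (((n : Int) + 2) * si + 1).toNat 0)

def probs (nb : Int) (si : Int) : List Int := probsA nb.toNat si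

-- ===== PORT B =====
-- one convolution step of Source B: prefix sums of dist, then a window difference per target t
def pvStep (si : Int) (dist : List Int) (m : Int) : List Int :=
  let pref := (dist.foldl (fun (acc : List Int × Int) x =>
      (acc.1 ++ [acc.2 + x], acc.2 + x)) ([0], 0)).1
  let L : Int := dist.length
  (PySem.List.pyRange 0 (m * si + 1) 1).map
    (fun t => pref.getD (min t L).toNat 0 - pref.getD (max (t - si) 0).toNat 0)

def probs_alt (nb : Int) (si : Int) : List Int :=
  (PySem.List.pyRange 2 (nb + 1) 1).foldl (pvStep si) (0 :: List.replicate si.toNat 1)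

-- ===== PRECONDITION & SPEC =====
-- Python A recurses without end (RecursionError) for nb < 1; those inputs are excluded.
def Pre_probs (nb : Int) (si : Int) : Prop := 1 ≤ nb
instance (nb : Int) (si : Int) : Decidable (Pre_probs nb si) := by unfold Pre_probs; infer_instance
def pvWitness_probs : Int × Int := (3, 2)

def Spec_probs (nb : Int) (si : Int) (out : List Int) : Prop := out = probs_alt nb si
instance (nb : Int) (si : Int) (out : List Int) : Decidable (Spec_probs nb si out) := by unfold Spec_probs; infer_instance

-- ===== CLAIM (what is proved, stated in full; the proofs are below) =====
def Claim_equal_probs : Prop := ∀ (nb : Int) (si : Int), Dom_probs nb si → Pre_probs nb si → Spec_probs nb si (probs nb si)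

-- ===== LEMMAS AND PROOFS =====

theorem pvAddAt_length (l : List Int) (i : Nat) (v : Int) : (pvAddAt l i v).length = l.length := by
  simp [pvAddAt]

theorem set_getD (l : List Int) (i j : Nat) (a : Int) :
    (l.set i a).getD j 0 = if i = j ∧ j < l.length then a else l.getD j 0 := by
  simp [List.getD, List.getElem?_set]; split_ifs <;> simp_all

theorem pvAddAt_getD (l : List Int) (i t : Nat) (v : Int) :
    (pvAddAt l i v).getD t 0 = l.getD t 0 + (if t = i ∧ t < l.length then v else 0) := by
  rw [pvAddAt, set_getD]
  by_cases h : t = i ∧ t < l.length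
  · obtain ⟨rfl, hlt⟩ := h; simp [hlt]
  · have h' : ¬ (i = t ∧ t < l.length) := fun ⟨e, hl⟩ => h ⟨e.symm, hl⟩
    simp [h, h']

theorem foldl_addAt_len (ks : List Int) (f : Int → Nat) (v : Int) (r : List Int) :
    (ks.foldl (fun r k => pvAddAt r (f k) v) r).length = r.length := by
  induction ks generalizing r with
  | nil => rfl
  | cons k ks ih => rw [List.foldl_cons, ih, pvAddAt_length]

theorem foldl_addAt_getD (ks : List Int) (f : Int → Nat) (v : Int) (r : List Int) (t : Nat)
    (ht : t < r.length) :
    (ks.foldl (fun r k => pvAddAt r (f k) v) r).getD t 0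
      = r.getD t 0 + ((ks.filter (fun k => f k == t)).length : Int) * v := by
  induction ks generalizing r with
  | nil => simp
  | cons k ks ih =>
    rw [List.foldl_cons, ih _ (by rw [pvAddAt_length]; exact ht), pvAddAt_getD]
    by_cases h : t = f k
    · simp [List.filter_cons, h.symm, ht]; push_cast; ring
    · have h' : ¬ (f k = t) := fun e => h e.symm
      simp [List.filter_cons, h, h', ht]

theorem filter_faces (si : Int) (j t : Nat) :
    (((PySem.List.pyRange 1 (si + 1) 1).filter (fun k => (((j : Int) + k).toNat == t))).length : Int)
      = if 1 ≤ (t : Int) - (j : Int) ∧ (t : Int) - (j : Int) ≤ si then 1 else 0 := by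
  rw [PySem.List.pyRange_one, List.filter_map, List.length_map]
  by_cases hjt : j + 1 ≤ t
  · have hcong : ∀ k ∈ List.range (si + 1 - 1).toNat,
        ((fun k => (((j : Int) + k).toNat == t)) ∘ (fun k : Nat => (1 : Int) + k)) k
          = (k == t - (j + 1)) := by
      intro k _
      simp only [Function.comp]
      rw [show ((j : Int) + (1 + (k : Int))).toNat = j + 1 + k from by omega]
      by_cases h2 : j + 1 + k = t
      · simp [h2]; omega
      · simp [h2]; omega
    rw [List.filter_congr hcong, ← List.countP_eq_length_filter]
    rw [show (List.range (si + 1 - 1).toNat).countP (fun k => k == t - (j + 1))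
        = (List.range (si + 1 - 1).toNat).count (t - (j + 1)) from rfl]
    rw [List.count_range]
    by_cases hc : t - (j + 1) < (si + 1 - 1).toNat
    · rw [if_pos hc, if_pos (by omega)]; norm_num
    · rw [if_neg hc, if_neg (by omega)]; norm_num
  · have hnil : (List.range (si + 1 - 1).toNat).filter
        ((fun k => (((j : Int) + k).toNat == t)) ∘ (fun k : Nat => (1 : Int) + k)) = [] := by
      apply List.filter_eq_nil_iff.mpr
      intro k _
      simp only [Function.comp]
      simp only [beq_eq_false_iff_ne, ne_eq, beq_iff_eq]
      omega
    rw [hnil, if_neg (by omega)]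
    norm_num

theorem scatter_len (ant : List Int) (si : Int) (js : List Nat) (r : List Int) :
    (js.foldl (fun r (j : Nat) =>
        (PySem.List.pyRange 1 (si + 1) 1).foldl
          (fun r k => pvAddAt r ((j : Int) + k).toNat (ant.getD j 0)) r) r).length = r.length := by
  induction js generalizing r with
  | nil => rfl
  | cons j js ih => rw [List.foldl_cons, ih, foldl_addAt_len]

theorem scatter_getD (ant : List Int) (si : Int) (js : List Nat) (r : List Int) (t : Nat)
    (ht : t < r.length) :
    (js.foldl (fun r (j : Nat) =>
        (PySem.List.pyRange 1 (si + 1) 1).foldl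
          (fun r k => pvAddAt r ((j : Int) + k).toNat (ant.getD j 0)) r) r).getD t 0
      = r.getD t 0 +
        ((js.filter (fun (j : Nat) =>
            decide (1 ≤ (t : Int) - (j : Int) ∧ (t : Int) - (j : Int) ≤ si))).map
          (fun (j : Nat) => ant.getD j 0)).sum := by
  induction js generalizing r with
  | nil => simp
  | cons j js ih =>
    rw [List.foldl_cons, ih _ (by rw [foldl_addAt_len]; exact ht),
      foldl_addAt_getD _ _ _ _ _ ht, filter_faces, List.filter_cons]
    by_cases h : 1 ≤ (t : Int) - (j : Int) ∧ (t : Int) - (j : Int) ≤ si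
    · rw [if_pos h, if_pos (by simpa using h), List.map_cons, List.sum_cons]
      ring
    · rw [if_neg h, if_neg (by simpa using h)]
      ring

theorem filter_range_sum (L : Nat) (p : Nat → Bool) (g : Nat → Int) :
    (((List.range L).filter p).map g).sum = ∑ j ∈ Finset.range L, if p j then g j else 0 := by
  induction L with
  | zero => simp
  | succ n ih =>
    rw [List.range_succ, List.filter_append, List.map_append, List.sum_append, ih,
      Finset.sum_range_succ]
    by_cases h : p n <;> simp [h]

theorem pref_fold (l : List Int) (p : List Int) (s : Int) :
    (l.foldl (fun (acc : List Int × Int) x => (acc.1 ++ [acc.2 + x], acc.2 + x)) (p, s)).1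
      = p ++ (List.range l.length).map (fun i => s + (l.take (i + 1)).sum) := by
  induction l generalizing p s with
  | nil => simp
  | cons x xs ih =>
    rw [List.foldl_cons, ih, List.length_cons, List.range_succ_eq_map]
    simp [List.map_map, Function.comp_def, List.take_succ_cons, add_assoc, List.append_assoc]

theorem pref_getD (l : List Int) (i : Nat) (h : i ≤ l.length) :
    ((l.foldl (fun (acc : List Int × Int) x => (acc.1 ++ [acc.2 + x], acc.2 + x)) ([0], 0)).1).getD i 0
      = (l.take i).sum := by
  rw [pref_fold]
  cases i with
  | zero => simp
  | succ n =>
    have hn : n < l.length := by omega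
    rw [List.singleton_append, List.getD_cons_succ]
    rw [List.getD_eq_getElem _ 0 (by simpa using hn)]
    simp [hn]

theorem take_sum (l : List Int) (i : Nat) (h : i ≤ l.length) :
    (l.take i).sum = ∑ j ∈ Finset.range i, l.getD j 0 := by
  induction i with
  | zero => simp
  | succ n ih =>
    have hn : n < l.length := by omega
    rw [List.take_add_one, List.sum_append, ih (by omega), Finset.sum_range_succ]
    simp [List.getD_eq_getElem _ _ hn, List.getElem?_eq_getElem hn]

theorem scatter_eq_pvStep (ant : List Int) (si m : Int)
    (h : 0 < m * si + 1 → 0 ≤ si ∧ m * si + 1 ≤ (ant.length : Int) + si + 1) :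
    (List.range ant.length).foldl
      (fun r (j : Nat) =>
        (PySem.List.pyRange 1 (si + 1) 1).foldl
          (fun r k => pvAddAt r ((j : Int) + k).toNat (ant.getD j 0)) r)
      (List.replicate (m * si + 1).toNat 0) = pvStep si ant m := by
  unfold pvStep
  apply List.ext_getElem
  · rw [scatter_len]
    simp [PySem.List.length_pyRange_one]
  · intro i h1 h2
    rw [scatter_len] at h1
    simp only [List.length_replicate] at h1
    have hM : 0 < m * si + 1 := by omega
    obtain ⟨hsi, hML⟩ := h hM
    rw [← List.getD_eq_getElem _ 0, ← List.getD_eq_getElem _ 0]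
    rw [scatter_getD _ _ _ _ _ (by simpa using h1)]
    rw [List.getD_replicate, filter_range_sum]
    rw [List.getD_eq_getElem _ 0 h2, List.getElem_map, PySem.List.getElem_pyRange_one]
    simp only [zero_add]
    have hb : (min ((i : Int)) ((ant.length : Int))).toNat ≤ ant.length := by omega
    have ha : (max ((i : Int) - si) 0).toNat ≤ ant.length := by omega
    rw [pref_getD _ _ hb, pref_getD _ _ ha, take_sum _ _ hb, take_sum _ _ ha,
      ← Finset.sum_Ico_eq_sub _ (by omega)]
    rw [← Finset.sum_filter]
    apply Finset.sum_congr ?_ (fun _ _ => rfl)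
    ext j
    simp only [Finset.mem_filter, Finset.mem_range, Finset.mem_Ico, decide_eq_true_eq]
    omega
    exact h1

-- length of probsA for si ≥ 0
theorem probsA_len (si : Int) (hsi : 0 ≤ si) (n : Nat) :
    ((probsA (n + 1) si).length : Int) = ((n : Int) + 1) * si + 1 := by
  cases n with
  | zero => simp [probsA]; omega
  | succ k =>
    show ((probsA (k + 2) si).length : Int) = _
    simp only [probsA]
    rw [scatter_len]
    simp only [List.length_replicate]
    have h0 : (0:Int) ≤ ((k : Int) + 2) * si := mul_nonneg (by positivity) hsi
    have : (((k : Int) + 2) * si + 1).toNat = ((k : Int) + 2) * si + 1 := by omega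
    push_cast [this]
    ring

theorem main_nonneg (si : Int) (hsi : 0 ≤ si) (n : Nat) :
    probsA (n + 1) si
      = (PySem.List.pyRange 2 ((n : Int) + 2) 1).foldl (pvStep si) (0 :: List.replicate si.toNat 1) := by
  induction n with
  | zero =>
    rw [show ((0:Nat):Int) + 2 = 2 by norm_num, PySem.List.pyRange_one_eq_nil (by omega)]
    simp [probsA]
  | succ k ih =>
    rw [show ((k+1:Nat):Int) + 2 = ((k : Int) + 2) + 1 by push_cast; ring]
    rw [PySem.List.pyRange_one_succ_right (by omega), List.foldl_append, ← ih]
    show probsA (k + 2) si = _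
    simp only [List.foldl_cons, List.foldl_nil]
    simp only [probsA]
    apply scatter_eq_pvStep
    intro _
    refine ⟨hsi, ?_⟩
    rw [probsA_len si hsi k]
    have : ((k : Int) + 2) * si = ((k : Int) + 1) * si + si := by ring
    linarith

theorem main_neg (si : Int) (hsi : si < 0) (n : Nat) :
    probsA (n + 2) si
      = (PySem.List.pyRange 2 ((n : Int) + 3) 1).foldl (pvStep si) (0 :: List.replicate si.toNat 1) := by
  have hle : ((n : Int) + 2) * si ≤ 2 * si := by nlinarith [Int.natCast_nonneg n]
  have hA : probsA (n + 2) si = [] := by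
    have hlen : (probsA (n + 2) si).length = 0 := by
      simp only [probsA]
      rw [scatter_len]
      simp only [List.length_replicate]
      omega
    exact List.length_eq_zero_iff.mp hlen
  rw [hA, show (n : Int) + 3 = ((n : Int) + 2) + 1 by ring,
    PySem.List.pyRange_one_succ_right (by omega), List.foldl_append]
  simp only [List.foldl_cons, List.foldl_nil]
  symm
  simp only [pvStep]
  rw [show PySem.List.pyRange 0 (((n : Int) + 2) * si + 1) 1 = []
      from PySem.List.pyRange_one_eq_nil (by nlinarith)]
  simp

-- ===== VERDICT (by name: the statement is the Claim_ definition above) =====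
theorem probs_spec : Claim_equal_probs := by
  intro nb si _ hpre
  unfold Spec_probs
  obtain ⟨n, hn⟩ : ∃ n : Nat, nb = (n : Int) + 1 := ⟨(nb - 1).toNat, by unfold Pre_probs at hpre; omega⟩
  subst hn
  unfold probs probs_alt
  rw [show ((n : Int) + 1).toNat = n + 1 by omega]
  by_cases hsi : 0 ≤ si
  · rw [show (n : Int) + 1 + 1 = (n : Int) + 2 by ring]
    exact main_nonneg si hsi n
  · have hsi' : si < 0 := lt_of_not_ge hsi
    cases n with
    | zero =>
      rw [show ((0:Nat):Int) + 1 + 1 = 2 by norm_num, PySem.List.pyRange_one_eq_nil (by omega)]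
      simp [probsA]
    | succ k =>
      rw [show ((k+1:Nat):Int) + 1 + 1 = (k : Int) + 3 by push_cast; ring]
      exact main_neg si hsi' k
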